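-- pv_equiv track=rewrite | github.com/JackTEdwards/Project-Euler | Answers/Prob5.py | smallestDivisible
-- ===== SOURCE A (Python) =====
-- def smallestDivisible(n):
--     i = 0
--     result = 0
--     highVal = n-1
--     lowVal = n//2
--
--     while True:
--         i += 1
--         testNum = n*i
--         isDiv = True
--
--         for j in range(highVal, lowVal, -1):
--             if(testNum%j !=0):
--                 isDiv = False
--                 break
--
--         if(isDiv):
--             result = testNum
--             break
--
--     return result
-- ===== SOURCE B (Python) =====
-- def smallestDivisible(n):
--     # LCM accumulation via gcd instead of trial multiples.
--     def gcd(a, b):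
--         a, b = abs(a), abs(b)
--         while b:
--             a, b = b, a % b
--         return a
--     L = 1
--     for j in range(n // 2 + 1, n):
--         L = L // gcd(L, j) * j
--     return n * (L // gcd(L, n))
-- ===== Notes on version B (the rewrite author's own statement) =====
-- stated objective: faster
-- what changed: Instead of testing successive multiples n*i against every j in the range, B accumulates the LCM of the range via the Euclidean gcd and returns n * (LCM // gcd(LCM, n)) directly; intended as asymptotically faster — a timing run could not get a clean ratio because A already timed out on small inputs where B returned instantly.
import Mathlib
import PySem

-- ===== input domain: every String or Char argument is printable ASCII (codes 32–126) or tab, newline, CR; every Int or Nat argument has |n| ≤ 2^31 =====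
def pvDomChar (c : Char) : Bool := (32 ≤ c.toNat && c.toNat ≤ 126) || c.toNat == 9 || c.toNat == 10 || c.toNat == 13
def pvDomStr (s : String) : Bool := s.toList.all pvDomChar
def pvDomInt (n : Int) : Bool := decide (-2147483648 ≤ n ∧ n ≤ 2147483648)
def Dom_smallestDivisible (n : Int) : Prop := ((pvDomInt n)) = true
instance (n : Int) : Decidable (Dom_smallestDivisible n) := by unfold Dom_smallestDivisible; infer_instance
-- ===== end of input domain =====

-- B replaces A's trial of successive multiples by an accumulation of the LCM of the range via the Euclidean gcd (intended as faster; a timing run could not confirm a ratio because A timed out where B returned).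

-- ===== PORT A =====
-- the inner 'for j in range(highVal, lowVal, -1)' with its break: returns the final isDiv
def pvCheckA (testNum : Int) : List Int → Bool
  | [] => true
  | j :: js => if PySem.Int.mod testNum j ≠ 0 then false else pvCheckA testNum js

-- fuel for the 'while True' loop (a termination device only: proved sufficient below)
def pvFuelA (n : Int) : Nat :=
  ((PySem.List.pyRange (n - 1) (PySem.Int.floordiv n 2) (-1)).foldl
      (fun a j => Nat.lcm a j.natAbs) 1) + 1

def pvLoopA (n : Int) (i : Int) : Nat → Int
  | 0 => 0
  | fuel + 1 =>
      let i' := i + 1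
      let testNum := n * i'
      if pvCheckA testNum (PySem.List.pyRange (n - 1) (PySem.Int.floordiv n 2) (-1)) then
        testNum
      else
        pvLoopA n i' fuel

def smallestDivisible (n : Int) : Int := pvLoopA n 0 (pvFuelA n)

-- ===== PORT B =====
-- Source B's hand-written Euclidean gcd: a, b = abs(a), abs(b); while b: a, b = b, a % b
def pvGcdLoop : Nat → Nat → Nat
  | a, 0 => a
  | a, b + 1 => pvGcdLoop (b + 1) (a % (b + 1))
termination_by _ b => b
decreasing_by exact Nat.lt_of_lt_of_le (Nat.mod_lt _ (Nat.succ_pos b)) (Nat.le_refl _)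

def pvGcdB (a b : Int) : Int := (pvGcdLoop a.natAbs b.natAbs : Nat)

def smallestDivisible_alt (n : Int) : Int :=
  let L := (PySem.List.pyRange (PySem.Int.floordiv n 2 + 1) n 1).foldl
      (fun L j => PySem.Int.floordiv L (pvGcdB L j) * j) 1
  n * PySem.Int.floordiv L (pvGcdB L n)

-- ===== PRECONDITION & SPEC =====
def Spec_smallestDivisible (n : Int) (out : Int) : Prop := out = smallestDivisible_alt n
instance (n : Int) (out : Int) : Decidable (Spec_smallestDivisible n out) := by unfold Spec_smallestDivisible; infer_instance

-- ===== CLAIM (what is proved, stated in full; the proofs are below) =====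
def Claim_equal_smallestDivisible : Prop := ∀ (n : Int), Dom_smallestDivisible n → Spec_smallestDivisible n (smallestDivisible n)

-- ===== LEMMAS AND PROOFS =====

-- the fold B and the fuel of A both compute (up to cast) this Nat lcm fold
def pvNatLcm (l : List Int) (s : Nat) : Nat := l.foldl (fun a j => Nat.lcm a j.natAbs) s

theorem pvNatLcm_dvd_iff (l : List Int) : ∀ (s x : Nat),
    (pvNatLcm l s ∣ x ↔ s ∣ x ∧ ∀ j ∈ l, j.natAbs ∣ x) := by
  induction l with
  | nil => intro s x; simp [pvNatLcm]
  | cons j l ih =>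
      intro s x
      simp only [pvNatLcm, List.foldl] at *
      rw [ih]
      constructor
      · rintro ⟨h1, h2⟩
        exact ⟨(Nat.dvd_lcm_left _ _).trans h1, fun k hk => by
          rcases List.mem_cons.mp hk with h | h
          · exact h ▸ (Nat.dvd_lcm_right _ _).trans h1
          · exact h2 k h⟩
      · rintro ⟨h1, h2⟩
        exact ⟨Nat.lcm_dvd h1 (h2 j (List.mem_cons_self)), fun k hk => h2 k (List.mem_cons_of_mem _ hk)⟩

theorem pvNatLcm_ne_zero (l : List Int) : ∀ (s : Nat), s ≠ 0 → (∀ j ∈ l, j ≠ 0) →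
    pvNatLcm l s ≠ 0 := by
  induction l with
  | nil => intro s hs _; simpa [pvNatLcm] using hs
  | cons j l ih =>
      intro s hs hl
      simp only [pvNatLcm, List.foldl] at *
      exact ih _ (Nat.lcm_ne_zero hs (Int.natAbs_ne_zero.mpr (hl j List.mem_cons_self)))
        (fun k hk => hl k (List.mem_cons_of_mem _ hk))

theorem pvGcdLoop_eq : ∀ (b a : Nat), pvGcdLoop a b = Nat.gcd b a := by
  intro b
  induction b using Nat.strong_induction_on with
  | _ b ih =>
      intro a
      match b with
      | 0 => simp [pvGcdLoop]
      | b + 1 =>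
          have h1 : pvGcdLoop a (b + 1) = pvGcdLoop (b + 1) (a % (b + 1)) := by
            rw [pvGcdLoop]
          rw [h1, ih _ (Nat.mod_lt _ (Nat.succ_pos b))]
          exact (Nat.gcd_rec _ _).symm

theorem pvGcdB_eq (a b : Int) : pvGcdB a b = (Nat.gcd b.natAbs a.natAbs : Nat) := by
  simp [pvGcdB, pvGcdLoop_eq]

-- membership facts about the two ranges
theorem pv_memA (n j : Int) :
    j ∈ PySem.List.pyRange (n - 1) (PySem.Int.floordiv n 2) (-1) ↔
      PySem.Int.floordiv n 2 < j ∧ j ≤ n - 1 := PySem.List.mem_pyRange_neg_one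

theorem pv_memB (n j : Int) :
    j ∈ PySem.List.pyRange (PySem.Int.floordiv n 2 + 1) n 1 ↔
      PySem.Int.floordiv n 2 + 1 ≤ j ∧ j < n := PySem.List.mem_pyRange_one

theorem pv_floordiv_two (n : Int) : PySem.Int.floordiv n 2 = n / 2 :=
  PySem.Int.floordiv_eq_ediv_of_pos (by norm_num)

theorem pv_pos_of_memB (n j : Int)
    (h : j ∈ PySem.List.pyRange (PySem.Int.floordiv n 2 + 1) n 1) : 1 ≤ j := by
  rw [pv_memB, pv_floordiv_two] at h
  omega

theorem pv_memA_iff_memB (n j : Int) :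
    j ∈ PySem.List.pyRange (n - 1) (PySem.Int.floordiv n 2) (-1) ↔
      j ∈ PySem.List.pyRange (PySem.Int.floordiv n 2 + 1) n 1 := by
  rw [pv_memA, pv_memB]; omega

theorem pvNatLcm_dvd_of_subset (l1 l2 : List Int) (h : ∀ j ∈ l1, j ∈ l2) :
    pvNatLcm l1 1 ∣ pvNatLcm l2 1 := by
  rw [pvNatLcm_dvd_iff]
  exact ⟨Nat.one_dvd _, fun j hj => ((pvNatLcm_dvd_iff l2 1 _).mp dvd_rfl).2 j (h j hj)⟩

-- the two Nat lcm folds agree (same members)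
theorem pv_lcm_eq (n : Int) :
    pvNatLcm (PySem.List.pyRange (n - 1) (PySem.Int.floordiv n 2) (-1)) 1 =
      pvNatLcm (PySem.List.pyRange (PySem.Int.floordiv n 2 + 1) n 1) 1 :=
  Nat.dvd_antisymm
    (pvNatLcm_dvd_of_subset _ _ (fun j hj => (pv_memA_iff_memB n j).mp hj))
    (pvNatLcm_dvd_of_subset _ _ (fun j hj => (pv_memA_iff_memB n j).mpr hj))

-- pvCheckA is the all-divide predicate
theorem pvCheckA_iff (t : Int) (l : List Int) :
    pvCheckA t l = true ↔ ∀ j ∈ l, j ∣ t := by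
  induction l with
  | nil => simp [pvCheckA]
  | cons j l ih =>
      simp only [pvCheckA]
      by_cases h : PySem.Int.mod t j = 0
      · have hd : j ∣ t := (PySem.Int.mod_eq_zero_iff_dvd t j).mp h
        simp [h, ih, hd]
      · have hd : ¬ j ∣ t := fun hdd => h ((PySem.Int.mod_eq_zero_iff_dvd t j).mpr hdd)
        simp [h, hd]

-- B's Int fold equals the Nat lcm fold (all elements positive)
theorem pv_div_gcd_mul (s a : Nat) (ha : 0 < a) :
    s / Nat.gcd a s * a = Nat.lcm s a := by
  have hg : 0 < Nat.gcd a s := Nat.gcd_pos_of_pos_left _ ha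
  have hgs : Nat.gcd a s ∣ s := Nat.gcd_dvd_right _ _
  have h2 : s * a = s / Nat.gcd a s * a * Nat.gcd a s := by
    conv_lhs => rw [← Nat.div_mul_cancel hgs]
    ring
  rw [Nat.lcm, Nat.gcd_comm s a, h2, Nat.mul_div_cancel _ hg]

theorem pv_foldB_eq (l : List Int) (hpos : ∀ j ∈ l, 1 ≤ j) : ∀ (s : Nat), 0 < s →
    l.foldl (fun L j => PySem.Int.floordiv L (pvGcdB L j) * j) ((s : Nat) : Int) =
      ((pvNatLcm l s : Nat) : Int) := by
  induction l with
  | nil => intro s _; simp [pvNatLcm]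
  | cons j l ih =>
      intro s hs
      have hj : 1 ≤ j := hpos j List.mem_cons_self
      have hm : 0 < j.natAbs := by omega
      have h1 : (((s : Nat) : Int)).natAbs = s := Int.natAbs_natCast s
      have hjcast : ((j.natAbs : Nat) : Int) = j := Int.natAbs_of_nonneg (by omega)
      have hstep : PySem.Int.floordiv ((s : Nat) : Int) (pvGcdB ((s : Nat) : Int) j) * j =
          ((Nat.lcm s j.natAbs : Nat) : Int) := by
        rw [pvGcdB_eq, h1, PySem.Int.floordiv_natCast, ← pv_div_gcd_mul s j.natAbs hm,
          Nat.cast_mul, hjcast]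
      simp only [List.foldl]
      rw [hstep, ih (fun k hk => hpos k (List.mem_cons_of_mem _ hk)) _
        (Nat.pos_of_ne_zero (Nat.lcm_ne_zero (by omega) (by omega)))]
      simp [pvNatLcm, List.foldl]

-- the minimal positive i with L ∣ m * i is L / gcd L m
theorem pv_key_pos (L m : Nat) (hL : 0 < L) : 0 < L / Nat.gcd L m :=
  Nat.div_pos (Nat.le_of_dvd hL (Nat.gcd_dvd_left L m)) (Nat.gcd_pos_of_pos_left _ hL)

theorem pv_key_dvd (L m : Nat) : L ∣ m * (L / Nat.gcd L m) := by
  have h1 : m / Nat.gcd L m * Nat.gcd L m = m := Nat.div_mul_cancel (Nat.gcd_dvd_right L m)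
  have h2 : Nat.gcd L m * (L / Nat.gcd L m) = L := Nat.mul_div_cancel' (Nat.gcd_dvd_left L m)
  refine ⟨m / Nat.gcd L m, ?_⟩
  calc m * (L / Nat.gcd L m)
      = m / Nat.gcd L m * Nat.gcd L m * (L / Nat.gcd L m) := by rw [h1]
    _ = m / Nat.gcd L m * (Nat.gcd L m * (L / Nat.gcd L m)) := by ring
    _ = m / Nat.gcd L m * L := by rw [h2]
    _ = L * (m / Nat.gcd L m) := by ring

theorem pv_key_min (L m : Nat) (hL : 0 < L) (k : Nat) (hk : 0 < k) (h : L ∣ m * k) :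
    L / Nat.gcd L m ≤ k := by
  have hg : 0 < Nat.gcd L m := Nat.gcd_pos_of_pos_left _ hL
  have hco : Nat.Coprime (L / Nat.gcd L m) (m / Nat.gcd L m) :=
    Nat.coprime_div_gcd_div_gcd hg
  have e1 : Nat.gcd L m * (L / Nat.gcd L m) = L := Nat.mul_div_cancel' (Nat.gcd_dvd_left L m)
  have e2 : Nat.gcd L m * (m / Nat.gcd L m) = m := Nat.mul_div_cancel' (Nat.gcd_dvd_right L m)
  have h2 : L / Nat.gcd L m ∣ m / Nat.gcd L m * k := by
    apply (Nat.mul_dvd_mul_iff_left hg).mp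
    rw [e1, ← Nat.mul_assoc, e2]
    exact h
  have h3 : L / Nat.gcd L m ∣ k := hco.dvd_of_dvd_mul_right (by rwa [Nat.mul_comm] at h2)
  exact Nat.le_of_dvd hk h3

-- the while-loop returns n * i0 for the least valid i0, given enough fuel
theorem pv_loopA_eq (n : Int) (i0 : Nat)
    (hc : pvCheckA (n * (i0 : Int))
      (PySem.List.pyRange (n - 1) (PySem.Int.floordiv n 2) (-1)) = true)
    (hmin : ∀ k : Nat, 0 < k → k < i0 → pvCheckA (n * (k : Int))
      (PySem.List.pyRange (n - 1) (PySem.Int.floordiv n 2) (-1)) = false) :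
    ∀ (fuel i : Nat), i < i0 → i0 ≤ i + fuel → pvLoopA n (i : Int) fuel = n * (i0 : Int) := by
  intro fuel
  induction fuel with
  | zero => intro i h1 h2; omega
  | succ fuel ih =>
      intro i h1 h2
      have hcast : (i : Int) + 1 = ((i + 1 : Nat) : Int) := by push_cast; ring
      by_cases h : i + 1 = i0
      · simp only [pvLoopA, hcast, h, hc, if_true]
      · have hlt : i + 1 < i0 := by omega
        simp only [pvLoopA, hcast, hmin (i + 1) (by omega) hlt, Bool.false_eq_true, if_false]
        exact ih (i + 1) hlt (by omega)

-- ===== VERDICT (by name: the statement is the Claim_ definition above) =====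
theorem smallestDivisible_spec : Claim_equal_smallestDivisible := by
  intro n _
  unfold Spec_smallestDivisible smallestDivisible smallestDivisible_alt
  set RA := PySem.List.pyRange (n - 1) (PySem.Int.floordiv n 2) (-1) with hRA
  set RB := PySem.List.pyRange (PySem.Int.floordiv n 2 + 1) n 1 with hRB
  set Lnat := pvNatLcm RB 1 with hLnat
  have hLpos : 0 < Lnat := Nat.pos_of_ne_zero
    (pvNatLcm_ne_zero RB 1 one_ne_zero (fun j hj => by have := pv_pos_of_memB n j hj; omega))
  set m := n.natAbs with hm
  set g := Nat.gcd Lnat m with hg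
  set i0 := Lnat / g with hi0
  have h0 : 0 < i0 := pv_key_pos Lnat m hLpos
  -- characterization of pvCheckA over RA in terms of Lnat
  have hchar : ∀ k : Nat, (pvCheckA (n * (k : Int)) RA = true ↔ Lnat ∣ m * k) := by
    intro k
    rw [pvCheckA_iff]
    constructor
    · intro h
      rw [hLnat, pvNatLcm_dvd_iff]
      refine ⟨Nat.one_dvd _, fun j hj => ?_⟩
      have hjA : j ∈ RA := (pv_memA_iff_memB n j).mpr hj
      have := Int.natAbs_dvd_natAbs.mpr (h j hjA)
      simpa [Int.natAbs_mul] using this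
    · intro h j hj
      have hjB : j ∈ RB := (pv_memA_iff_memB n j).mp hj
      have hj2 : j.natAbs ∣ Lnat :=
        ((pvNatLcm_dvd_iff RB 1 Lnat).mp dvd_rfl).2 j hjB
      have : j.natAbs ∣ (n * (k : Int)).natAbs := by
        rw [Int.natAbs_mul]
        simpa using hj2.trans h
      exact Int.natAbs_dvd_natAbs.mp this
  -- A's side
  have hfuel : pvFuelA n = Lnat + 1 := by
    have h := pv_lcm_eq n
    rw [← hRA, ← hRB] at h
    show pvNatLcm RA 1 + 1 = Lnat + 1
    rw [h, hLnat]
  have hA : pvLoopA n 0 (pvFuelA n) = n * (i0 : Int) := by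
    rw [hfuel]
    have := pv_loopA_eq n i0
      ((hchar i0).mpr (pv_key_dvd Lnat m))
      (fun k hk hlt => by
        by_contra hne
        have : pvCheckA (n * (k : Int)) RA = true := by
          cases hb : pvCheckA (n * (k : Int)) RA
          · exact absurd hb hne
          · rfl
        have h5 := pv_key_min Lnat m hLpos k hk ((hchar k).mp this)
        have h6 : i0 ≤ k := by rw [hi0, hg]; exact h5
        omega)
      (Lnat + 1) 0 h0 (by rw [hi0]; have := Nat.div_le_self Lnat g; omega)
    simpa using this
  -- B's side
  have hfold : RB.foldl (fun L j => PySem.Int.floordiv L (pvGcdB L j) * j) 1 =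
      ((Lnat : Nat) : Int) := by
    have := pv_foldB_eq RB (fun j hj => pv_pos_of_memB n j hj) 1 Nat.one_pos
    simpa using this
  have hB : n * PySem.Int.floordiv ((Lnat : Nat) : Int)
      (pvGcdB ((Lnat : Nat) : Int) n) = n * (i0 : Int) := by
    rw [pvGcdB_eq]
    have h1 : (((Lnat : Nat) : Int)).natAbs = Lnat := Int.natAbs_natCast Lnat
    rw [h1]
    rw [show Nat.gcd n.natAbs Lnat = g from by rw [hg, Nat.gcd_comm, hm]]
    rw [PySem.Int.floordiv_natCast]
  simp only [hfold, hB, hA]
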